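-- pv_equiv track=rewrite | github.com/thomasonzhou/roboweave | frontend/websocket_bridge.py | _assess_mission_alignment
-- ===== SOURCE A (Python) =====
-- def _assess_mission_alignment(user_command: str, motion_primitives):
--     """Assess if the generated motion plan aligns with the user's mission."""
--     if not motion_primitives:
--         return "No motion primitives generated, mission alignment cannot be determined."
--
--     # Check if the primary action is a backward motion
--     if any(p.get('r') in ['unitree_backward', 'alt_down'] for p in motion_primitives):
--         return "Mission: Evade threat. Action: Backward retreat. Alignment: High."
--
--     # Check if the primary action is a forward motion
--     if any(p.get('r') in ['unitree_forward_trot', 'unitree_forward_walk'] for p in motion_primitives):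
--         return "Mission: Move forward. Action: Forward locomotion. Alignment: High."
--
--     # Check if the primary action is a rotational motion
--     if any(p.get('r') in ['unitree_turn_left', 'unitree_turn_right'] for p in motion_primitives):
--         return "Mission: Navigate. Action: Rotational movement. Alignment: High."
--
--     # Check if the primary action is a dynamic motion (like bound)
--     if any(p.get('r') in ['unitree_bound'] for p in motion_primitives):
--         return "Mission: Move dynamically. Action: Bound motion. Alignment: High."
--
--     # Default alignment if no specific action is identified
--     return "Mission: Unknown. Action: Default forward motion. Alignment: Medium."
-- ===== SOURCE B (Python) =====
-- def _assess_mission_alignment(user_command: str, motion_primitives):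
--     """Single pass: collect category flags, then decide by priority."""
--     if not motion_primitives:
--         return "No motion primitives generated, mission alignment cannot be determined."
--     has_backward = has_forward = has_rotate = has_bound = False
--     for p in motion_primitives:
--         r = p.get('r')
--         if r in ['unitree_backward', 'alt_down']:
--             has_backward = True
--         elif r in ['unitree_forward_trot', 'unitree_forward_walk']:
--             has_forward = True
--         elif r in ['unitree_turn_left', 'unitree_turn_right']:
--             has_rotate = True
--         elif r in ['unitree_bound']:
--             has_bound = True
--     if has_backward:
--         return "Mission: Evade threat. Action: Backward retreat. Alignment: High."
--     if has_forward:
--         return "Mission: Move forward. Action: Forward locomotion. Alignment: High."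
--     if has_rotate:
--         return "Mission: Navigate. Action: Rotational movement. Alignment: High."
--     if has_bound:
--         return "Mission: Move dynamically. Action: Bound motion. Alignment: High."
--     return "Mission: Unknown. Action: Default forward motion. Alignment: Medium."
-- ===== Notes on version B (the rewrite author's own statement) =====
-- stated objective: alternative
-- what changed: Replaces four sequential any() scans over motion_primitives with a single pass that sets four category flags, followed by a priority ladder over the flags.
import Mathlib
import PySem

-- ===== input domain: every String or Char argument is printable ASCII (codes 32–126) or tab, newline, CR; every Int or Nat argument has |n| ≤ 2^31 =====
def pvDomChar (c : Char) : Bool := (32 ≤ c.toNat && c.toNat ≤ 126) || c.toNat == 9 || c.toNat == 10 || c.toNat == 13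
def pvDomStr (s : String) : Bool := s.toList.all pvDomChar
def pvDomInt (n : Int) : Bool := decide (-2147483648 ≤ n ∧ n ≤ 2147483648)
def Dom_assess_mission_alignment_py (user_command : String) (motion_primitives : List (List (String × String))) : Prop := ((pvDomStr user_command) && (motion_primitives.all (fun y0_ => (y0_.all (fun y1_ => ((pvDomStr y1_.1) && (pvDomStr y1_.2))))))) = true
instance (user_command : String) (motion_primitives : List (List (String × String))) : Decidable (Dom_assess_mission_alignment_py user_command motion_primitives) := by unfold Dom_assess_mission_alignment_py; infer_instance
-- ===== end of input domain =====

-- ===== PORT A =====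
-- B merges A's four sequential any() scans into one pass with category flags; same return value.
-- p.get('r') on the assoc-list representation of the dict: first (and only) match.
def pvGetR (p : List (String × String)) : Option String :=
  PySem.Dict.get? (PySem.Dict.mk p) "r"

def assess_mission_alignment_py (user_command : String) (motion_primitives : List (List (String × String))) : String :=
  if motion_primitives.isEmpty then
    "No motion primitives generated, mission alignment cannot be determined."
  else if motion_primitives.any (fun p => pvGetR p == some "unitree_backward" || pvGetR p == some "alt_down") then
    "Mission: Evade threat. Action: Backward retreat. Alignment: High."
  else if motion_primitives.any (fun p => pvGetR p == some "unitree_forward_trot" || pvGetR p == some "unitree_forward_walk") then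
    "Mission: Move forward. Action: Forward locomotion. Alignment: High."
  else if motion_primitives.any (fun p => pvGetR p == some "unitree_turn_left" || pvGetR p == some "unitree_turn_right") then
    "Mission: Navigate. Action: Rotational movement. Alignment: High."
  else if motion_primitives.any (fun p => pvGetR p == some "unitree_bound") then
    "Mission: Move dynamically. Action: Bound motion. Alignment: High."
  else
    "Mission: Unknown. Action: Default forward motion. Alignment: Medium."

-- ===== PORT B =====
-- one fold step of B's loop: set the flag of the category of p.get('r') (elif ladder)
def pvStepFlags (fl : Bool × Bool × Bool × Bool) (p : List (String × String)) : Bool × Bool × Bool × Bool :=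
  if pvGetR p == some "unitree_backward" || pvGetR p == some "alt_down" then
    (true, fl.2.1, fl.2.2.1, fl.2.2.2)
  else if pvGetR p == some "unitree_forward_trot" || pvGetR p == some "unitree_forward_walk" then
    (fl.1, true, fl.2.2.1, fl.2.2.2)
  else if pvGetR p == some "unitree_turn_left" || pvGetR p == some "unitree_turn_right" then
    (fl.1, fl.2.1, true, fl.2.2.2)
  else if pvGetR p == some "unitree_bound" then
    (fl.1, fl.2.1, fl.2.2.1, true)
  else fl

def assess_mission_alignment_py_alt (user_command : String) (motion_primitives : List (List (String × String))) : String :=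
  if motion_primitives.isEmpty then
    "No motion primitives generated, mission alignment cannot be determined."
  else
    let fl := motion_primitives.foldl pvStepFlags (false, false, false, false)
    if fl.1 then "Mission: Evade threat. Action: Backward retreat. Alignment: High."
    else if fl.2.1 then "Mission: Move forward. Action: Forward locomotion. Alignment: High."
    else if fl.2.2.1 then "Mission: Navigate. Action: Rotational movement. Alignment: High."
    else if fl.2.2.2 then "Mission: Move dynamically. Action: Bound motion. Alignment: High."
    else "Mission: Unknown. Action: Default forward motion. Alignment: Medium."

-- ===== PRECONDITION & SPEC =====
def Spec_assess_mission_alignment_py (user_command : String) (motion_primitives : List (List (String × String))) (out : String) : Prop := out = assess_mission_alignment_py_alt user_command motion_primitives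
instance (user_command : String) (motion_primitives : List (List (String × String))) (out : String) : Decidable (Spec_assess_mission_alignment_py user_command motion_primitives out) := by unfold Spec_assess_mission_alignment_py; infer_instance

-- ===== CLAIM =====
def Claim_equal_assess_mission_alignment_py : Prop := ∀ (user_command : String) (motion_primitives : List (List (String × String))), Dom_assess_mission_alignment_py user_command motion_primitives → Spec_assess_mission_alignment_py user_command motion_primitives (assess_mission_alignment_py user_command motion_primitives)

-- ===== LEMMAS AND PROOFS =====
-- One step of B's fold or-s into each flag exactly the per-element test of A's corresponding any().
lemma pv_step_eq (fl : Bool × Bool × Bool × Bool) (p : List (String × String)) :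
    pvStepFlags fl p =
      (fl.1 || (pvGetR p == some "unitree_backward" || pvGetR p == some "alt_down"),
       fl.2.1 || (pvGetR p == some "unitree_forward_trot" || pvGetR p == some "unitree_forward_walk"),
       fl.2.2.1 || (pvGetR p == some "unitree_turn_left" || pvGetR p == some "unitree_turn_right"),
       fl.2.2.2 || (pvGetR p == some "unitree_bound")) := by
  obtain ⟨a, b, c, d⟩ := fl
  unfold pvStepFlags
  cases hr : pvGetR p with
  | none => simp [hr]
  | some s =>
    split_ifs with h1 h2 h3 h4
    · simp only [Option.some.injEq, beq_iff_eq, Bool.or_eq_true, decide_eq_true_eq] at h1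
      rcases h1 with h | h <;> subst h <;> simp
    · simp only [Option.some.injEq, beq_iff_eq, Bool.or_eq_true, decide_eq_true_eq] at h2
      rcases h2 with h | h <;> subst h <;> simp
    · simp only [Option.some.injEq, beq_iff_eq, Bool.or_eq_true, decide_eq_true_eq] at h3
      rcases h3 with h | h <;> subst h <;> simp
    · simp only [Option.some.injEq, beq_iff_eq] at h4
      subst h4; simp
    · simp only [Option.some.injEq, beq_iff_eq, Bool.or_eq_true, not_or] at h1 h2 h3 h4
      simp [beq_iff_eq, h1.1, h1.2, h2.1, h2.2, h3.1, h3.2, h4]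

-- The whole fold computes A's four any-scans, each or-ed with its start flag.
lemma pv_flags_eq (l : List (List (String × String))) : ∀ (b f r d : Bool),
    l.foldl pvStepFlags (b, f, r, d) =
      (b || l.any (fun p => pvGetR p == some "unitree_backward" || pvGetR p == some "alt_down"),
       f || l.any (fun p => pvGetR p == some "unitree_forward_trot" || pvGetR p == some "unitree_forward_walk"),
       r || l.any (fun p => pvGetR p == some "unitree_turn_left" || pvGetR p == some "unitree_turn_right"),
       d || l.any (fun p => pvGetR p == some "unitree_bound")) := by
  induction l with
  | nil => simp
  | cons x t ih =>
    intro b f r d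
    rw [List.foldl_cons, pv_step_eq]
    simp [ih, List.any_cons, Bool.or_assoc]

-- ===== VERDICT =====
theorem assess_mission_alignment_py_spec : Claim_equal_assess_mission_alignment_py := by
  intro uc mps _
  unfold Spec_assess_mission_alignment_py assess_mission_alignment_py assess_mission_alignment_py_alt
  by_cases he : mps.isEmpty
  · simp [he]
  · simp only [he, if_false]
    rw [pv_flags_eq mps false false false false]
    simp
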